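-- pv_equiv track=rewrite | github.com/Hilmar-Corp/hc_taildep | paper/make_paper.py | _pick_btc_eth_cols
-- ===== SOURCE A (Python) =====
-- def _pick_btc_eth_cols(asset_cols: list[str]) -> tuple[str | None, str | None]:
--     # Heuristics: prefer canonical BTC/ETH columns
--     cols_lower = {c.lower(): c for c in asset_cols}
--     btc = None
--     eth = None
--     for k in ["btc", "r_btc", "btc_usdt", "btcusdt", "u_btc", "btc_return", "btc_returns"]:
--         if k in cols_lower:
--             btc = cols_lower[k]
--             break
--     for k in ["eth", "r_eth", "eth_usdt", "ethusdt", "u_eth", "eth_return", "eth_returns"]: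
--         if k in cols_lower:
--             eth = cols_lower[k]
--             break
--     # If not found, try substring match
--     if btc is None:
--         for c in asset_cols:
--             if "btc" in c.lower():
--                 btc = c
--                 break
--     if eth is None:
--         for c in asset_cols:
--             if "eth" in c.lower():
--                 eth = c
--                 break
--     return btc, eth
-- ===== SOURCE B (Python) =====
-- def _pick_btc_eth_cols(asset_cols: list[str]) -> tuple[str | None, str | None]:
--     # One forward pass per asset: track the best-ranked exact candidate match
--     # (<= so a later duplicate-lowercase column wins, like dict overwrite) and
--     # the first substring fallback; no dict of columns, no separate fallback scans.
--     def pick(cands, kw):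
--         rank = {k: i for i, k in enumerate(cands)}
--         best = None  # (rank, column)
--         sub = None
--         for c in asset_cols:
--             lc = c.lower()
--             r = rank.get(lc)
--             if r is not None and (best is None or r <= best[0]):
--                 best = (r, c)
--             if sub is None and kw in lc:
--                 sub = c
--         return best[1] if best is not None else sub
--
--     btc = pick(["btc", "r_btc", "btc_usdt", "btcusdt", "u_btc", "btc_return", "btc_returns"], "btc")
--     eth = pick(["eth", "r_eth", "eth_usdt", "ethusdt", "u_eth", "eth_return", "eth_returns"], "eth")
--     return btc, eth
-- ===== Notes on version B (the rewrite author's own statement) =====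
-- stated objective: alternative
-- what changed: Replaces A's lowercase->column dict plus fixed-key probing and separate substring-fallback rescans by one forward pass per asset that keeps the best-ranked exact candidate match (priority map over the candidate list, <= update for last-write-wins) and the first substring fallback.
import Mathlib
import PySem

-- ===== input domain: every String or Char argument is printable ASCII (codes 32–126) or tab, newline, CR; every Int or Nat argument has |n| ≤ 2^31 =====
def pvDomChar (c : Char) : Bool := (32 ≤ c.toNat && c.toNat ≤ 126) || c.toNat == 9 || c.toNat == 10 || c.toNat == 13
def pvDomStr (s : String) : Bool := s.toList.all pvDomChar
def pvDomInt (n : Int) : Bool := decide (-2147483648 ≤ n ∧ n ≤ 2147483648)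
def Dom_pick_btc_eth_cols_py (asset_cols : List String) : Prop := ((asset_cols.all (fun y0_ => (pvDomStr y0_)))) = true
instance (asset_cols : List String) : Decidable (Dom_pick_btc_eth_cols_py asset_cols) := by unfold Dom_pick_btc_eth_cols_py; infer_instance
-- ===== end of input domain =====

-- B replaces the dict-of-columns + fixed-key probing + fallback rescans by one
-- forward pass per asset keeping the best-ranked exact match and the first
-- substring fallback; same results, a different decomposition (not faster).

-- ===== PORT A =====
def pvBtcKeys : List String := ["btc", "r_btc", "btc_usdt", "btcusdt", "u_btc", "btc_return", "btc_returns"]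
def pvEthKeys : List String := ["eth", "r_eth", "eth_usdt", "ethusdt", "u_eth", "eth_return", "eth_returns"]

-- the 'for k in [...]: if k in cols_lower: … break' loop
def pvFirstKey (d : PySem.Dict String String) : List String → Option String
  | [] => none
  | k :: ks =>
    match d.get? k with
    | some v => some v
    | none => pvFirstKey d ks

-- the 'for c in asset_cols: if "kw" in c.lower(): … break' fallback loop
def pvFirstSub (kw : String) : List String → Option String
  | [] => none
  | c :: cs => if PySem.Str.isIn kw (PySem.Str.lower c) then some c else pvFirstSub kw cs

def pick_btc_eth_cols_py (asset_cols : List String) : Option String × Option String :=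
  let cols_lower := asset_cols.foldl (fun d c => d.insert (PySem.Str.lower c) c) PySem.Dict.empty
  let btc := pvFirstKey cols_lower pvBtcKeys
  let eth := pvFirstKey cols_lower pvEthKeys
  let btc' := match btc with | none => pvFirstSub "btc" asset_cols | some v => some v
  let eth' := match eth with | none => pvFirstSub "eth" asset_cols | some v => some v
  (btc', eth')

-- ===== PORT B =====
-- rank = {k: i for i, k in enumerate(cands)}
def pvRank (cands : List String) : PySem.Dict String Int :=
  (PySem.List.enumerate cands).foldl (fun d p => d.insert p.2 p.1) PySem.Dict.empty

-- one iteration of B's single loop: update (best, sub)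
def pvPickStep (rank : PySem.Dict String Int) (kw : String)
    (st : Option (Int × String) × Option String) (c : String) :
    Option (Int × String) × Option String :=
  (match rank.get? (PySem.Str.lower c), st.1 with
   | some r, none => some (r, c)
   | some r, some (r0, c0) => if r ≤ r0 then some (r, c) else some (r0, c0)
   | none, b => b,
   match st.2 with
   | some s => some s
   | none => if PySem.Str.isIn kw (PySem.Str.lower c) then some c else none)

def pvPick (cands : List String) (kw : String) (asset_cols : List String) : Option String :=
  let rank := pvRank cands
  let st := asset_cols.foldl (pvPickStep rank kw) (none, none)
  match st.1 with
  | some (_, c) => some c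
  | none => st.2

def pick_btc_eth_cols_py_alt (asset_cols : List String) : Option String × Option String :=
  (pvPick pvBtcKeys "btc" asset_cols, pvPick pvEthKeys "eth" asset_cols)

-- ===== PRECONDITION & SPEC =====
def Spec_pick_btc_eth_cols_py (asset_cols : List String) (out : Option String × Option String) : Prop := out = pick_btc_eth_cols_py_alt asset_cols
instance (asset_cols : List String) (out : Option String × Option String) : Decidable (Spec_pick_btc_eth_cols_py asset_cols out) := by unfold Spec_pick_btc_eth_cols_py; infer_instance

-- ===== CLAIM (what is proved, stated in full; the proofs are below) =====
def Claim_equal_pick_btc_eth_cols_py : Prop := ∀ (asset_cols : List String), Dom_pick_btc_eth_cols_py asset_cols → Spec_pick_btc_eth_cols_py asset_cols (pick_btc_eth_cols_py asset_cols)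

-- ===== LEMMAS AND PROOFS =====

-- rank (as a Nat) of s in the candidate list
def rkOf : List String → String → Option Nat
  | [], _ => none
  | k :: ks, s => if k = s then some 0 else (rkOf ks s).map (· + 1)

-- B's best-update, abstracted over Nat ranks
def pvU (b : Option (Nat × String)) (r? : Option Nat) (c : String) : Option (Nat × String) :=
  match r? with
  | none => b
  | some r =>
    match b with
    | none => some (r, c)
    | some (r0, c0) => if r ≤ r0 then some (r, c) else some (r0, c0)

-- reference result of the exact-match search: first candidate (by index ≥ i)
-- that some column lowers to, paired with the LAST such column
def pvRF (L : List String) : List String → Nat → Option (Nat × String)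
  | [], _ => none
  | k :: ks, i =>
    match (L.filter (fun c => PySem.Str.lower c == k)).getLast? with
    | some c => some (i, c)
    | none => pvRF L ks (i + 1)

theorem pvRF_nil (ks : List String) (i : Nat) : pvRF [] ks i = none := by
  induction ks generalizing i with
  | nil => rfl
  | cons k ks ih => simp [pvRF, ih]

theorem pvRF_ge (L ks : List String) (i r : Nat) (c : String)
    (h : pvRF L ks i = some (r, c)) : i ≤ r := by
  induction ks generalizing i with
  | nil => simp [pvRF] at h
  | cons k ks ih =>
    simp only [pvRF] at h
    cases hg : (L.filter (fun c => PySem.Str.lower c == k)).getLast? with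
    | some cl => rw [hg] at h; simp at h; omega
    | none => rw [hg] at h; exact Nat.le_of_succ_le (ih (i + 1) h)

theorem pvRF_append (L : List String) (c : String) (ks : List String) (i : Nat) :
    pvRF (L ++ [c]) ks i = pvU (pvRF L ks i) ((rkOf ks (PySem.Str.lower c)).map (· + i)) c := by
  induction ks generalizing i with
  | nil => simp [pvRF, rkOf, pvU]
  | cons k ks ih =>
    by_cases h : k = PySem.Str.lower c
    · have hfilt : (L ++ [c]).filter (fun x => PySem.Str.lower x == k)
          = L.filter (fun x => PySem.Str.lower x == k) ++ [c] := by
        simp [List.filter_append, h]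
      simp only [pvRF, hfilt, List.getLast?_append, rkOf, if_pos h]
      cases hg : (L.filter (fun x => PySem.Str.lower x == k)).getLast? with
      | some cl => simp [pvU]
      | none =>
        cases hb : pvRF L ks (i + 1) with
        | none => simp [pvU]
        | some p =>
          obtain ⟨r0, c0⟩ := p
          have : i ≤ r0 := Nat.le_of_succ_le (pvRF_ge L ks (i + 1) r0 c0 hb)
          simp [pvU, this]
    · have hfilt : (L ++ [c]).filter (fun x => PySem.Str.lower x == k)
          = L.filter (fun x => PySem.Str.lower x == k) := by
        rw [List.filter_append]
        have : [c].filter (fun x => PySem.Str.lower x == k) = [] := by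
          simp only [List.filter_cons, List.filter_nil, beq_iff_eq]
          rw [if_neg (fun hc => h hc.symm)]
        rw [this, List.append_nil]
      simp only [pvRF, hfilt, rkOf, if_neg h]
      cases hg : (L.filter (fun x => PySem.Str.lower x == k)).getLast? with
      | some cl =>
        cases hr : rkOf ks (PySem.Str.lower c) with
        | none => simp [pvU]
        | some x => simp [pvU, Nat.not_le.mpr (by omega : i < x + 1 + i)]
      | none =>
        rw [ih (i + 1)]
        cases hr : rkOf ks (PySem.Str.lower c) with
        | none => simp [pvU]
        | some x =>
          have : x + (i + 1) = x + 1 + i := by omega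
          simp [pvU, this]

theorem pvFirstSub_append (kw : String) (L : List String) (c : String) :
    pvFirstSub kw (L ++ [c]) =
      match pvFirstSub kw L with
      | some s => some s
      | none => if PySem.Str.isIn kw (PySem.Str.lower c) then some c else none := by
  induction L with
  | nil => simp [pvFirstSub]
  | cons x xs ih =>
    show (if PySem.Str.isIn kw (PySem.Str.lower x) = true then some x else pvFirstSub kw (xs ++ [c])) = _
    by_cases h : PySem.Str.isIn kw (PySem.Str.lower x) = true
    · rw [if_pos h]
      simp only [pvFirstSub, if_pos h]
    · rw [if_neg h, ih]
      simp only [pvFirstSub, if_neg h]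

-- the dict of A holds, per lowercase key, the LAST column lowering to it
theorem pvDict_get (L : List String) (k : String) :
    (L.foldl (fun d c => d.insert (PySem.Str.lower c) c) PySem.Dict.empty).get? k
      = (L.filter (fun c => PySem.Str.lower c == k)).getLast? := by
  induction L using List.reverseRecOn with
  | nil => simp [PySem.Dict.get?_empty]
  | append_singleton L c ih =>
    rw [List.foldl_append]
    simp only [List.foldl]
    by_cases h : PySem.Str.lower c = k
    · rw [h, PySem.Dict.get?_insert_self]
      simp [List.filter_append, h, List.getLast?_append]
    · rw [PySem.Dict.get?_insert_of_ne _ _ (fun hk => h hk.symm)]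
      rw [ih]
      have : (L ++ [c]).filter (fun x => PySem.Str.lower x == k)
          = L.filter (fun x => PySem.Str.lower x == k) := by
        rw [List.filter_append]
        have h2 : [c].filter (fun x => PySem.Str.lower x == k) = [] := by
          simp only [List.filter_cons, List.filter_nil, beq_iff_eq]
          rw [if_neg h]
        rw [h2, List.append_nil]
      rw [this]

-- A's key-probing loop returns the value component of pvRF
theorem pvFirstKey_eq_rf (L : List String) (ks : List String) (i : Nat) :
    pvFirstKey (L.foldl (fun d c => d.insert (PySem.Str.lower c) c) PySem.Dict.empty) ks
      = (pvRF L ks i).map (·.2) := by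
  induction ks generalizing i with
  | nil => rfl
  | cons k ks ih =>
    simp only [pvFirstKey, pvRF, pvDict_get]
    cases hg : (L.filter (fun c => PySem.Str.lower c == k)).getLast? with
    | some cl => simp
    | none => simp [ih (i + 1)]

-- B's fold computes pvRF (cast to Int ranks) together with the first substring match
theorem pvFold_eq (cands : List String) (rank : PySem.Dict String Int) (kw : String)
    (hrk : ∀ k, rank.get? k = (rkOf cands k).map Int.ofNat) (L : List String) :
    L.foldl (pvPickStep rank kw) (none, none)
      = ((pvRF L cands 0).map (fun p => ((p.1 : Int), p.2)), pvFirstSub kw L) := by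
  induction L using List.reverseRecOn with
  | nil => simp [pvRF_nil, pvFirstSub]
  | append_singleton L c ih =>
    rw [List.foldl_append]
    simp only [List.foldl, ih]
    have hrf := pvRF_append L c cands 0
    have hmap : (rkOf cands (PySem.Str.lower c)).map (· + 0) = rkOf cands (PySem.Str.lower c) := by
      cases rkOf cands (PySem.Str.lower c) <;> simp
    rw [hmap] at hrf
    simp only [pvPickStep]
    rw [hrk (PySem.Str.lower c), hrf, pvFirstSub_append]
    cases hr : rkOf cands (PySem.Str.lower c) with
    | none =>
      simp only [Option.map_none]
      cases pvRF L cands 0 <;> simp [pvU]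
    | some r =>
      simp only [Option.map_some]
      cases hb : pvRF L cands 0 with
      | none => simp [pvU]
      | some p =>
        obtain ⟨r0, c0⟩ := p
        by_cases hle : r ≤ r0
        · simp [pvU, hle, Int.ofNat_le.mpr hle]
        · have : ¬ (Int.ofNat r ≤ Int.ofNat r0) := fun h => hle (Int.ofNat_le.mp h)
          simp [pvU, hle]

-- the concrete rank dicts agree with rkOf on every key
set_option maxRecDepth 8000 in
theorem pvRank_btc (k : String) : (pvRank pvBtcKeys).get? k = (rkOf pvBtcKeys k).map Int.ofNat := by
  have h : pvRank pvBtcKeys = ((((((PySem.Dict.empty.insert "btc" (0 : Int)).insert "r_btc" 1).insert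
      "btc_usdt" 2).insert "btcusdt" 3).insert "u_btc" 4).insert "btc_return" 5).insert "btc_returns" 6 := rfl
  rw [h]
  simp only [PySem.Dict.get?_insert, PySem.Dict.get?_empty, pvBtcKeys, rkOf]
  by_cases h1 : k = "btc"
  · subst h1; decide
  by_cases h2 : k = "r_btc"
  · subst h2; decide
  by_cases h3 : k = "btc_usdt"
  · subst h3; decide
  by_cases h4 : k = "btcusdt"
  · subst h4; decide
  by_cases h5 : k = "u_btc"
  · subst h5; decide
  by_cases h6 : k = "btc_return"
  · subst h6; decide
  by_cases h7 : k = "btc_returns"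
  · subst h7; decide
  simp [h1, h2, h3, h4, h5, h6, h7, Ne.symm h1, Ne.symm h2, Ne.symm h3, Ne.symm h4, Ne.symm h5, Ne.symm h6, Ne.symm h7]

set_option maxRecDepth 8000 in
theorem pvRank_eth (k : String) : (pvRank pvEthKeys).get? k = (rkOf pvEthKeys k).map Int.ofNat := by
  have h : pvRank pvEthKeys = ((((((PySem.Dict.empty.insert "eth" (0 : Int)).insert "r_eth" 1).insert
      "eth_usdt" 2).insert "ethusdt" 3).insert "u_eth" 4).insert "eth_return" 5).insert "eth_returns" 6 := rfl
  rw [h]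
  simp only [PySem.Dict.get?_insert, PySem.Dict.get?_empty, pvEthKeys, rkOf]
  by_cases h1 : k = "eth"
  · subst h1; decide
  by_cases h2 : k = "r_eth"
  · subst h2; decide
  by_cases h3 : k = "eth_usdt"
  · subst h3; decide
  by_cases h4 : k = "ethusdt"
  · subst h4; decide
  by_cases h5 : k = "u_eth"
  · subst h5; decide
  by_cases h6 : k = "eth_return"
  · subst h6; decide
  by_cases h7 : k = "eth_returns"
  · subst h7; decide
  simp [h1, h2, h3, h4, h5, h6, h7, Ne.symm h1, Ne.symm h2, Ne.symm h3, Ne.symm h4, Ne.symm h5, Ne.symm h6, Ne.symm h7]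

theorem pvPick_eq (cands : List String) (kw : String)
    (hrk : ∀ k, (pvRank cands).get? k = (rkOf cands k).map Int.ofNat) (L : List String) :
    (match pvFirstKey (L.foldl (fun d c => d.insert (PySem.Str.lower c) c) PySem.Dict.empty) cands with
      | none => pvFirstSub kw L
      | some v => some v)
    = pvPick cands kw L := by
  simp only [pvPick]
  rw [pvFold_eq cands (pvRank cands) kw hrk L]
  rw [pvFirstKey_eq_rf L cands 0]
  cases pvRF L cands 0 with
  | none => simp
  | some p => obtain ⟨r, c⟩ := p; simp

-- ===== VERDICT (by name: the statement is the Claim_ definition above) =====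
theorem pick_btc_eth_cols_py_spec : Claim_equal_pick_btc_eth_cols_py := by
  intro L _
  unfold Spec_pick_btc_eth_cols_py
  show pick_btc_eth_cols_py L = pick_btc_eth_cols_py_alt L
  simp only [pick_btc_eth_cols_py, pick_btc_eth_cols_py_alt]
  rw [← pvPick_eq pvBtcKeys "btc" pvRank_btc L, ← pvPick_eq pvEthKeys "eth" pvRank_eth L]
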